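-- pv_equiv track=rewrite | github.com/daviolimen/Exercises | Questões/fusoes.py | bfs
-- ===== SOURCE A (Python) =====
-- from collections import deque
--
-- def bfs(graph, start):
--     visited, queue = set(), deque([start])
--     visited.add(start)
--     while queue:
--         vertex = queue.popleft()
--         for v in graph[vertex]:
--             if v in visited:
--                 continue
--             else:
--                 visited.add(v)
--                 queue.append(v)
--     return visited
-- ===== SOURCE B (Python) =====
-- def bfs(graph, start):
--     visited = set()
--
--     def visit(v):
--         visited.add(v)
--         for w in graph[v]:
--             if w not in visited:
--                 visit(w)
--
--     visit(start)
--     return visited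
-- ===== Notes on version B (the rewrite author's own statement) =====
-- stated objective: alternative
-- what changed: Replaces the deque-based breadth-first worklist loop with a recursive depth-first traversal (implicit call stack, no queue); the returned set of reachable vertices is identical.
import Mathlib
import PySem

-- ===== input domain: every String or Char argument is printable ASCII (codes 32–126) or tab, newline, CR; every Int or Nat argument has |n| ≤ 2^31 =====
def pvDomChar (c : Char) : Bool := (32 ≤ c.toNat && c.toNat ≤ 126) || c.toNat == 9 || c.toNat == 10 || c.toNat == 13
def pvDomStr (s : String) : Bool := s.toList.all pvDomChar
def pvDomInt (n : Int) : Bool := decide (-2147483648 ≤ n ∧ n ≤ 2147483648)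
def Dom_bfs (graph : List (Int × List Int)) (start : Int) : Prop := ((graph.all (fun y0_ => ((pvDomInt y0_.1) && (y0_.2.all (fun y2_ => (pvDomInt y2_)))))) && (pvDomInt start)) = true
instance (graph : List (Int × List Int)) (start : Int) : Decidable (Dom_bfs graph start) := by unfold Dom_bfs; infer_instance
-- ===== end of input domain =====

-- B replaces A's deque-based breadth-first worklist by a recursive depth-first traversal; the
-- returned SET of reachable vertices is identical.  Python returns a set (whose iteration order is
-- not modelled), so both ports present that set sorted ascending — a canonical representation.

-- shared hand port of the dict lookup 'graph[v]' (first-match association lookup, exact per the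
-- dict convention; returns [] exactly where Python raises KeyError — those inputs are outside Pre_)
def pyNbrs (graph : List (Int × List Int)) (v : Int) : List Int :=
  match graph with
  | [] => []
  | (k, ns) :: rest => if k == v then ns else pyNbrs rest v

-- ===== PORT A =====
-- inner 'for v in graph[vertex]: if v in visited: continue else: visited.add(v); queue.append(v)'
def bfsStep (V Q : List Int) (ns : List Int) : List Int × List Int :=
  ns.foldl (fun p v => if v ∈ p.1 then p else (PySem.Set.add p.1 v, p.2 ++ [v])) (V, Q)

-- the next three lemmas support bfsLoop's decreasing_by (they must precede the definition)
theorem bfsStep_cons (V Q : List Int) (v : Int) (ns : List Int) :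
    bfsStep V Q (v :: ns) =
      if v ∈ V then bfsStep V Q ns else bfsStep (PySem.Set.add V v) (Q ++ [v]) ns := by
  by_cases h : v ∈ V <;> simp [bfsStep, List.foldl_cons, h]

theorem bfsStep_progress (ns V Q : List Int) :
    bfsStep V Q ns = (V, Q) ∨
      (V.toFinset ⊂ (bfsStep V Q ns).1.toFinset ∧
        (bfsStep V Q ns).1.toFinset ⊆ V.toFinset ∪ ns.toFinset) := by
  induction ns generalizing V Q with
  | nil => exact Or.inl rfl
  | cons v rest ih =>
    rw [bfsStep_cons]
    by_cases hv : v ∈ V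
    · rw [if_pos hv]
      rcases ih V Q with h | ⟨h1, h2⟩
      · exact Or.inl h
      · refine Or.inr ⟨h1, h2.trans ?_⟩
        intro x hx; simp at hx ⊢; tauto
    · rw [if_neg hv]
      have hadd : (PySem.Set.add V v) = V ++ [v] := PySem.Set.add_of_not_mem hv
      have hVsub : V.toFinset ⊆ (PySem.Set.add V v).toFinset := by
        rw [hadd]; intro x hx; simp at hx ⊢; tauto
      have hVss : V.toFinset ⊂ (PySem.Set.add V v).toFinset := by
        refine (Finset.ssubset_iff_of_subset hVsub).mpr ⟨v, ?_, by simpa using hv⟩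
        rw [hadd]; simp
      rcases ih (PySem.Set.add V v) (Q ++ [v]) with h | ⟨h1, h2⟩
      · refine Or.inr ?_
        rw [h]
        refine ⟨hVss, ?_⟩
        rw [hadd]; intro x hx; simp at hx ⊢; tauto
      · refine Or.inr ⟨Finset.ssubset_of_ssubset_of_subset hVss h1.subset, h2.trans ?_⟩
        rw [hadd]; intro x hx; simp at hx ⊢; tauto

theorem pyNbrs_subset_flatMap (graph : List (Int × List Int)) (v : Int) :
    ∀ x ∈ pyNbrs graph v, x ∈ graph.flatMap (fun e => e.2) := by
  induction graph with
  | nil => intro x hx; simp [pyNbrs] at hx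
  | cons e rest ih =>
    intro x hx
    obtain ⟨k, ns⟩ := e
    rw [List.mem_flatMap]
    simp only [pyNbrs] at hx
    by_cases h : (k == v)
    · rw [if_pos h] at hx; exact ⟨(k, ns), by simp, hx⟩
    · rw [if_neg h] at hx
      obtain ⟨e', he', hxe⟩ := List.mem_flatMap.mp (ih x hx)
      exact ⟨e', List.mem_cons_of_mem _ he', hxe⟩

theorem pv_card_sdiff_lt {F A B N : Finset Int} (h1 : A ⊂ B) (h2 : B ⊆ A ∪ N) (h3 : N ⊆ F) :
    (F \ B).card < (F \ A).card := by
  apply Finset.card_lt_card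
  obtain ⟨x, hxB, hxA⟩ := Finset.exists_of_ssubset h1
  have hsub : F \ B ⊆ F \ A := Finset.sdiff_subset_sdiff (Finset.Subset.refl _) h1.subset
  refine (Finset.ssubset_iff_of_subset hsub).mpr ⟨x, ?_, ?_⟩
  · have hxN : x ∈ N := by
      rcases Finset.mem_union.mp (h2 hxB) with h | h
      · exact absurd h hxA
      · exact h
    exact Finset.mem_sdiff.mpr ⟨h3 hxN, hxA⟩
  · simp [Finset.mem_sdiff, hxB]

-- the 'while queue:' loop of A
def bfsLoop (graph : List (Int × List Int)) (V Q : List Int) : List Int :=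
  match Q with
  | [] => V
  | u :: Q' =>
      let p := bfsStep V Q' (pyNbrs graph u)
      bfsLoop graph p.1 p.2
termination_by (((graph.flatMap (fun e => e.2)).toFinset \ V.toFinset).card, Q.length)
decreasing_by
  rcases bfsStep_progress (pyNbrs graph u) V Q' with h | ⟨h1, h2⟩
  · rw [h]
    exact Prod.Lex.right _ (Nat.lt_succ_self _)
  · apply Prod.Lex.left
    exact pv_card_sdiff_lt h1 h2 (by
      intro x hx
      simp only [List.mem_toFinset] at hx ⊢
      exact pyNbrs_subset_flatMap graph u x hx)

def bfs (graph : List (Int × List Int)) (start : Int) : List Int :=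
  -- visited, queue = set(), deque([start]); visited.add(start); while queue: …; return visited
  PySem.List.sorted (bfsLoop graph (PySem.Set.add PySem.Set.empty start) [start]) (fun x => x) false

-- ===== PORT B =====
-- the nested 'def visit(v): visited.add(v); for w in graph[v]: if w not in visited: visit(w)'.
-- State after 'visited.add(v)' is (V, ws) = (visited, remaining neighbours of v); the subtype
-- records only that visit never removes vertices (needed for termination of the nested recursion).
-- The 'w ∈ flatMap' test is a totality guard ONLY: every w in ws comes from a neighbour list, so
-- it always holds where the recursion runs; it lets the measure (unvisited ∩ flatMap) decrease.
def dfsGo (graph : List (Int × List Int)) (V : List Int) (ws : List Int) :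
    {R : List Int // ∀ x ∈ V, x ∈ R} :=
  match ws with
  | [] => ⟨V, fun _ h => h⟩
  | w :: rest =>
      if hw : w ∈ V then
        -- 'if w not in visited' fails: skip w
        let r := dfsGo graph V rest
        ⟨r.1, r.2⟩
      else if hU : w ∈ graph.flatMap (fun e => e.2) then
        -- visit(w)
        let r1 := dfsGo graph (PySem.Set.add V w) (pyNbrs graph w)
        let r2 := dfsGo graph r1.1 rest
        ⟨r2.1, fun x hx => r2.2 x (r1.2 x (by
          rw [PySem.Set.add_of_not_mem hw]; exact List.mem_append_left _ hx))⟩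
      else
        -- dead branch (totality guard failed; unreachable on every input)
        let r := dfsGo graph V rest
        ⟨r.1, r.2⟩
termination_by (((graph.flatMap (fun e => e.2)).toFinset \ V.toFinset).card, ws.length)
decreasing_by
  · exact Prod.Lex.right _ (Nat.lt_succ_self _)
  · apply Prod.Lex.left
    apply Finset.card_lt_card
    have hVsub : ((graph.flatMap (fun e => e.2)).toFinset \ (PySem.Set.add V w).toFinset)
        ⊆ ((graph.flatMap (fun e => e.2)).toFinset \ V.toFinset) := by
      apply Finset.sdiff_subset_sdiff (Finset.Subset.refl _)
      rw [PySem.Set.add_of_not_mem hw]; intro x hx; simp at hx ⊢; tauto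
    refine (Finset.ssubset_iff_of_subset hVsub).mpr ⟨w, ?_, ?_⟩
    · exact Finset.mem_sdiff.mpr ⟨List.mem_toFinset.mpr hU, by simpa using hw⟩
    · simp [PySem.Set.add_of_not_mem hw]
  · apply Prod.Lex.left
    have h1 : ∀ x ∈ (PySem.Set.add V w).toFinset, x ∈ r1.1.toFinset := by
      intro x hx
      exact List.mem_toFinset.mpr (r1.2 x (List.mem_toFinset.mp hx))
    have hmid : ((graph.flatMap (fun e => e.2)).toFinset \ r1.1.toFinset).card
        ≤ ((graph.flatMap (fun e => e.2)).toFinset \ (PySem.Set.add V w).toFinset).card :=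
      Finset.card_le_card (Finset.sdiff_subset_sdiff (Finset.Subset.refl _) h1)
    refine lt_of_le_of_lt hmid (Finset.card_lt_card ?_)
    have hVsub : ((graph.flatMap (fun e => e.2)).toFinset \ (PySem.Set.add V w).toFinset)
        ⊆ ((graph.flatMap (fun e => e.2)).toFinset \ V.toFinset) := by
      apply Finset.sdiff_subset_sdiff (Finset.Subset.refl _)
      rw [PySem.Set.add_of_not_mem hw]; intro x hx; simp at hx ⊢; tauto
    refine (Finset.ssubset_iff_of_subset hVsub).mpr ⟨w, ?_, ?_⟩
    · exact Finset.mem_sdiff.mpr ⟨List.mem_toFinset.mpr hU, by simpa using hw⟩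
    · simp [PySem.Set.add_of_not_mem hw]
  · exact Prod.Lex.right _ (Nat.lt_succ_self _)

def bfs_alt (graph : List (Int × List Int)) (start : Int) : List Int :=
  -- visited = set(); visit(start); return visited
  PySem.List.sorted (dfsGo graph (PySem.Set.add PySem.Set.empty start) (pyNbrs graph start)).1 (fun x => x) false

-- ===== PRECONDITION & SPEC =====
-- Pre_ holds exactly when every vertex reachable from start has an entry in graph — stated in
-- closed form: some sublist S of the key list contains start and is forward-closed (every listed
-- neighbour of a member of S is again in S).  On all other inputs the Python (A and B alike)
-- raises KeyError.
def Pre_bfs (graph : List (Int × List Int)) (start : Int) : Prop :=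
  ∃ S ∈ (graph.map (fun e => e.1)).sublists,
    start ∈ S ∧ ∀ p ∈ graph, p.1 ∈ S → ∀ w ∈ p.2, w ∈ S
instance (graph : List (Int × List Int)) (start : Int) : Decidable (Pre_bfs graph start) := by
  unfold Pre_bfs; infer_instance

def pvWitness_bfs : (List (Int × List Int)) × Int := ([(0, [1]), (1, [0]), (2, [5])], 0)

def Spec_bfs (graph : List (Int × List Int)) (start : Int) (out : List Int) : Prop := out = bfs_alt graph start
instance (graph : List (Int × List Int)) (start : Int) (out : List Int) : Decidable (Spec_bfs graph start out) := by unfold Spec_bfs; infer_instance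

-- ===== CLAIM (what is proved, stated in full; the proofs are below) =====
def Claim_equal_bfs : Prop := ∀ (graph : List (Int × List Int)) (start : Int), Dom_bfs graph start → Pre_bfs graph start → Spec_bfs graph start (bfs graph start)

-- ===== LEMMAS AND PROOFS =====

-- reachability along graph edges (y a neighbour of x)
def ReachesB (graph : List (Int × List Int)) (a b : Int) : Prop :=
  Relation.ReflTransGen (fun x y => y ∈ pyNbrs graph x) a b

theorem reach_mem_of_closed (graph : List (Int × List Int)) (start : Int) (S : List Int)
    (h0 : start ∈ S) (hc : ∀ x ∈ S, ∀ y ∈ pyNbrs graph x, y ∈ S) :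
    ∀ x, ReachesB graph start x → x ∈ S := by
  intro x h
  induction h with
  | refl => exact h0
  | tail _ hedge ih => exact hc _ ih _ hedge

-- ---- facts about A's inner fold ----

theorem bfsStep_fst_mem (ns V Q : List Int) (x : Int) :
    x ∈ (bfsStep V Q ns).1 ↔ x ∈ V ∨ x ∈ ns := by
  induction ns generalizing V Q with
  | nil => simp [bfsStep]
  | cons v rest ih =>
    rw [bfsStep_cons]
    by_cases hv : v ∈ V
    · rw [if_pos hv, ih]
      constructor
      · rintro (h | h) <;> simp [h]
      · rintro (h | h)
        · exact Or.inl h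
        · rcases List.mem_cons.mp h with h | h
          · exact Or.inl (h ▸ hv)
          · exact Or.inr h
    · rw [if_neg hv, ih]
      rw [PySem.Set.add_of_not_mem hv]
      simp [List.mem_append, List.mem_cons]; tauto

theorem bfsStep_snd_mono (ns V Q : List Int) : ∀ q ∈ Q, q ∈ (bfsStep V Q ns).2 := by
  induction ns generalizing V Q with
  | nil => intro q hq; simpa [bfsStep] using hq
  | cons v rest ih =>
    intro q hq
    rw [bfsStep_cons]
    by_cases hv : v ∈ V
    · rw [if_pos hv]; exact ih V Q q hq
    · rw [if_neg hv]; exact ih _ _ q (List.mem_append_left _ hq)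

theorem bfsStep_fst_mem_snd (ns V Q : List Int) (x : Int) :
    x ∈ (bfsStep V Q ns).1 → x ∈ V ∨ x ∈ (bfsStep V Q ns).2 := by
  induction ns generalizing V Q with
  | nil => intro h; exact Or.inl (by simpa [bfsStep] using h)
  | cons v rest ih =>
    rw [bfsStep_cons]
    by_cases hv : v ∈ V
    · rw [if_pos hv]; exact ih V Q
    · rw [if_neg hv]
      intro hx
      rcases ih _ _ hx with h | h
      · rw [PySem.Set.add_of_not_mem hv] at h
        rcases List.mem_append.mp h with h | h
        · exact Or.inl h
        · exact Or.inr (bfsStep_snd_mono rest _ _ x (List.mem_append_right _ h))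
      · exact Or.inr h

theorem bfsStep_snd_subset (ns V Q : List Int) (x : Int) :
    x ∈ (bfsStep V Q ns).2 → x ∈ Q ∨ x ∈ ns := by
  induction ns generalizing V Q with
  | nil => intro h; exact Or.inl (by simpa [bfsStep] using h)
  | cons v rest ih =>
    rw [bfsStep_cons]
    by_cases hv : v ∈ V
    · rw [if_pos hv]
      intro h; rcases ih V Q h with h | h
      · exact Or.inl h
      · exact Or.inr (List.mem_cons_of_mem _ h)
    · rw [if_neg hv]
      intro h; rcases ih _ _ h with h | h
      · rcases List.mem_append.mp h with h | h
        · exact Or.inl h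
        · simp at h; exact Or.inr (by simp [h])
      · exact Or.inr (List.mem_cons_of_mem _ h)

theorem bfsStep_nodup (ns V Q : List Int) (h : V.Nodup) : (bfsStep V Q ns).1.Nodup := by
  induction ns generalizing V Q with
  | nil => simpa [bfsStep]
  | cons v rest ih =>
    rw [bfsStep_cons]
    by_cases hv : v ∈ V
    · rw [if_pos hv]; exact ih V Q h
    · rw [if_neg hv]; exact ih _ _ (PySem.Set.nodup_add _ _ h)

-- ---- facts about A's loop ----

theorem bfsLoop_mono (graph : List (Int × List Int)) :
    ∀ V Q, ∀ x ∈ V, x ∈ bfsLoop graph V Q := by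
  intro V Q
  fun_induction bfsLoop graph V Q with
  | case1 V => exact fun x hx => hx
  | case2 V u Q' p ih =>
    intro x hx
    exact ih x ((bfsStep_fst_mem _ _ _ x).mpr (Or.inl hx))

theorem bfsLoop_nodup (graph : List (Int × List Int)) :
    ∀ V Q, V.Nodup → (bfsLoop graph V Q).Nodup := by
  intro V Q
  fun_induction bfsLoop graph V Q with
  | case1 V => exact id
  | case2 V u Q' p ih => exact fun h => ih (bfsStep_nodup _ _ _ h)

theorem bfsLoop_sound (graph : List (Int × List Int)) (P : Int → Prop)
    (hcl : ∀ a b, P a → b ∈ pyNbrs graph a → P b) :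
    ∀ V Q, (∀ x ∈ V, P x) → (∀ q ∈ Q, P q) → ∀ x ∈ bfsLoop graph V Q, P x := by
  intro V Q
  fun_induction bfsLoop graph V Q with
  | case1 V => exact fun hV _ => hV
  | case2 V u Q' p ih =>
    intro hV hQ
    have hu : P u := hQ u List.mem_cons_self
    apply ih
    · intro x hx
      rcases (bfsStep_fst_mem _ _ _ x).mp hx with h | h
      · exact hV x h
      · exact hcl u x hu h
    · intro q hq
      rcases bfsStep_snd_subset _ _ _ q hq with h | h
      · exact hQ q (List.mem_cons_of_mem _ h)
      · exact hcl u q hu h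

theorem bfsLoop_closed (graph : List (Int × List Int)) (S : List Int) :
    ∀ V Q, (∀ x ∈ bfsLoop graph V Q, x ∈ S) →
      (∀ x ∈ V, x ∈ Q ∨ ∀ y ∈ pyNbrs graph x, y ∈ S) →
      ∀ x ∈ bfsLoop graph V Q, ∀ y ∈ pyNbrs graph x, y ∈ S := by
  intro V Q
  fun_induction bfsLoop graph V Q with
  | case1 V =>
    intro _ h x hx
    rcases h x hx with h' | h'
    · exact absurd h' List.not_mem_nil
    · exact h'
  | case2 V u Q' p ih =>
    intro hsub h
    apply ih hsub
    intro x hx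
    rcases bfsStep_fst_mem_snd _ _ _ x hx with hxV | hxp
    · rcases h x hxV with h' | h'
      · rcases List.mem_cons.mp h' with h' | h'
        · subst h'
          refine Or.inr (fun y hy => ?_)
          exact hsub y (bfsLoop_mono graph p.1 p.2 y ((bfsStep_fst_mem _ _ _ y).mpr (Or.inr hy)))
        · exact Or.inl (bfsStep_snd_mono _ _ _ x h')
      · exact Or.inr h'
    · exact Or.inl hxp

theorem bfs_mem (graph : List (Int × List Int)) (start x : Int) :
    x ∈ bfsLoop graph [start] [start] ↔ ReachesB graph start x := by
  constructor
  · intro h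
    exact bfsLoop_sound graph (ReachesB graph start)
      (fun a b ha hb => Relation.ReflTransGen.tail ha hb)
      [start] [start]
      (fun y hy => by simp at hy; exact hy ▸ Relation.ReflTransGen.refl)
      (fun y hy => by simp at hy; exact hy ▸ Relation.ReflTransGen.refl) x h
  · intro h
    refine reach_mem_of_closed graph start _ ?_ ?_ x h
    · exact bfsLoop_mono graph _ _ start (by simp)
    · exact bfsLoop_closed graph (bfsLoop graph [start] [start]) [start] [start]
        (fun y hy => hy) (fun y hy => Or.inl (by simpa using hy))

-- ---- facts about B's recursion ----

theorem dfsGo_sound (graph : List (Int × List Int)) (P : Int → Prop)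
    (hcl : ∀ a b, P a → b ∈ pyNbrs graph a → P b) :
    ∀ V ws, (∀ x ∈ V, P x) → (∀ w ∈ ws, P w) → ∀ x ∈ (dfsGo graph V ws).1, P x := by
  intro V ws
  fun_induction dfsGo graph V ws with
  | case1 V => intro hV _ x hx; exact hV x hx
  | case2 V w rest hw r ih =>
    intro hV hws
    exact ih hV (fun q hq => hws q (List.mem_cons_of_mem _ hq))
  | case3 V w rest hw hU r1 r2 ih1 ih2 =>
    intro hV hws
    have hPw : P w := hws w List.mem_cons_self
    apply ih2
    · apply ih1
      · intro x hx
        rw [PySem.Set.add_of_not_mem hw] at hx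
        rcases List.mem_append.mp hx with h | h
        · exact hV x h
        · simp at h; exact h ▸ hPw
      · intro y hy; exact hcl w y hPw hy
    · intro q hq; exact hws q (List.mem_cons_of_mem _ hq)
  | case4 V w rest hw hU r ih =>
    intro hV hws
    exact ih hV (fun q hq => hws q (List.mem_cons_of_mem _ hq))

theorem dfsGo_mem (graph : List (Int × List Int)) :
    ∀ V ws, (∀ w ∈ ws, w ∈ graph.flatMap (fun e => e.2)) →
      ∀ w ∈ ws, w ∈ (dfsGo graph V ws).1 := by
  intro V ws
  fun_induction dfsGo graph V ws with
  | case1 V => intro _ w hw; exact absurd hw List.not_mem_nil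
  | case2 V w rest hw r ih =>
    intro hws x hx
    rcases List.mem_cons.mp hx with h | h
    · exact r.2 x (h ▸ hw)
    · exact ih (fun q hq => hws q (List.mem_cons_of_mem _ hq)) x h
  | case3 V w rest hw hU r1 r2 ih1 ih2 =>
    intro hws x hx
    rcases List.mem_cons.mp hx with h | h
    · subst h
      apply r2.2
      apply r1.2
      rw [PySem.Set.add_of_not_mem hw]
      exact List.mem_append_right _ (by simp)
    · exact ih2 (fun q hq => hws q (List.mem_cons_of_mem _ hq)) x h
  | case4 V w rest hw hU r ih =>
    intro hws x hx
    exact absurd (hws w List.mem_cons_self) hU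

theorem dfsGo_closed (graph : List (Int × List Int)) (S : List Int) :
    ∀ V ws, (∀ x ∈ (dfsGo graph V ws).1, x ∈ S) →
      (∀ x ∈ V, ∀ y ∈ pyNbrs graph x, y ∈ S) →
      ∀ x ∈ (dfsGo graph V ws).1, ∀ y ∈ pyNbrs graph x, y ∈ S := by
  intro V ws
  fun_induction dfsGo graph V ws with
  | case1 V => intro _ hV x hx; exact hV x hx
  | case2 V w rest hw r ih => exact ih
  | case3 V w rest hw hU r1 r2 ih1 ih2 =>
    intro hsub hV
    apply ih2 hsub
    apply ih1
    · intro x hx; exact hsub x (r2.2 x hx)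
    · intro x hx
      rw [PySem.Set.add_of_not_mem hw] at hx
      rcases List.mem_append.mp hx with h | h
      · exact hV x h
      · simp at h; subst h
        intro y hy
        have hy1 : y ∈ r1.1 :=
          dfsGo_mem graph (PySem.Set.add V x) (pyNbrs graph x)
            (fun q hq => pyNbrs_subset_flatMap graph x q hq) y hy
        exact hsub y (r2.2 y hy1)
  | case4 V w rest hw hU r ih => exact ih

theorem dfsGo_nodup (graph : List (Int × List Int)) :
    ∀ V ws, V.Nodup → (dfsGo graph V ws).1.Nodup := by
  intro V ws
  fun_induction dfsGo graph V ws with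
  | case1 V => exact id
  | case2 V w rest hw r ih => exact ih
  | case3 V w rest hw hU r1 r2 ih1 ih2 => exact fun h => ih2 (ih1 (PySem.Set.nodup_add _ _ h))
  | case4 V w rest hw hU r ih => exact ih

theorem bfs_alt_mem (graph : List (Int × List Int)) (start x : Int) :
    x ∈ (dfsGo graph [start] (pyNbrs graph start)).1 ↔ ReachesB graph start x := by
  constructor
  · intro h
    exact dfsGo_sound graph (ReachesB graph start)
      (fun a b ha hb => Relation.ReflTransGen.tail ha hb)
      [start] (pyNbrs graph start)
      (fun y hy => by simp at hy; exact hy ▸ Relation.ReflTransGen.refl)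
      (fun w hw => Relation.ReflTransGen.single hw) x h
  · intro h
    refine reach_mem_of_closed graph start _ ?_ ?_ x h
    · exact (dfsGo graph [start] (pyNbrs graph start)).2 start (by simp)
    · apply dfsGo_closed graph _ [start] (pyNbrs graph start) (fun y hy => hy)
      intro y hy
      simp at hy
      rw [hy]
      intro z hz
      exact dfsGo_mem graph [start] (pyNbrs graph start)
        (fun q hq => pyNbrs_subset_flatMap graph start q hq) z hz

theorem pv_add_empty (s : Int) : PySem.Set.add PySem.Set.empty s = [s] := rfl

-- ===== VERDICT (by name: the statement is the Claim_ definition above) =====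
theorem bfs_spec : Claim_equal_bfs := by
  intro graph start _ _
  unfold Spec_bfs bfs bfs_alt
  rw [pv_add_empty]
  apply PySem.List.sorted_eq_sorted_of_perm _ _ _ (fun a b h => h)
  rw [List.perm_ext_iff_of_nodup (bfsLoop_nodup graph _ _ (by simp))
      (dfsGo_nodup graph [start] _ (by simp))]
  intro a
  rw [bfs_mem, bfs_alt_mem]
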